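-- pv_equiv track=rewrite | github.com/YunisAli-zade/Python | Exam/Ordinary/Picking Number.py | solution
-- ===== SOURCE A (Python) =====
-- from collections import Counter
--
-- def solution(a: list[int]) -> int:
--     dic = Counter(a)
--     if len(dic) == 1:
--         return dic[a[0]]
--     max_len_subarr = 0
--     for num in a:
--         max_len_subarr = max(max_len_subarr, dic[num] + dic.get(num + 1, 0))
--     return max_len_subarr
--     pass
-- ===== SOURCE B (Python) =====
-- def solution(a: list[int]) -> int:
--     s = sorted(a)
--     best = 0
--     l = 0
--     for r in range(len(s)):
--         while s[r] - s[l] > 1: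
--             l += 1
--         best = max(best, r - l + 1)
--     return best
-- ===== Notes on version B (the rewrite author's own statement) =====
-- stated objective: faster
-- what changed: Replaced the Counter plus per-element dic[num]+dic.get(num+1) scan (with a special case for a single distinct value) by sorting a copy and running a two-pointer sliding window that keeps max-min <= 1 and tracks the longest window.
import Mathlib
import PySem

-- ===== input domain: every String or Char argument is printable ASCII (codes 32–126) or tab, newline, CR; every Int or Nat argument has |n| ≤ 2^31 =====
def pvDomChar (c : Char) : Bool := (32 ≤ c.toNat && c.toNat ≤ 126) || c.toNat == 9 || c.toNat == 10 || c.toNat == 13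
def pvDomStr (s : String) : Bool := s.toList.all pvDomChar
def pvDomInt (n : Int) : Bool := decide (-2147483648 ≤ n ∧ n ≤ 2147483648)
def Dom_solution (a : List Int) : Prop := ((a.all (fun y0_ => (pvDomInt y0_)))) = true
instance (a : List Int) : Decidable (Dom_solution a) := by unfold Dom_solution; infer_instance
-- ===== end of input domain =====

-- B replaces A's Counter lookups by a sort + two-pointer sliding window (max-min ≤ 1); objective: alternative algorithm.

-- ===== PORT A =====
def solution (a : List Int) : Int :=
  let dic := PySem.Dict.counter a
  if dic.size = 1 then dic.getD ((PySem.List.pyGet? a 0).getD 0) 0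
  else a.foldl (fun m num => max m (dic.getD num 0 + dic.getD (num + 1) 0)) 0

-- ===== PORT B =====
-- inner `while s[r] - s[l] > 1: l += 1`; the `l < r` guard is only for termination
-- (Python's loop always stops by l = r, where s[r] - s[l] = 0 is not > 1).
def pvAdvance (s : List Int) (r l : Nat) : Nat :=
  if h : l < r ∧ s.getD r 0 - s.getD l 0 > 1 then pvAdvance s r (l + 1) else l
termination_by r - l
decreasing_by omega

def solution_alt (a : List Int) : Int :=
  let s := PySem.List.sorted a (fun x => x) false
  let st := (List.range s.length).foldl
    (fun (st : Nat × Int) r =>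
      let l := pvAdvance s r st.1
      (l, max st.2 ((r : Int) - (l : Int) + 1))) (0, 0)
  st.2

-- ===== PRECONDITION & SPEC =====
def Spec_solution (a : List Int) (out : Int) : Prop := out = solution_alt a
instance (a : List Int) (out : Int) : Decidable (Spec_solution a out) := by unfold Spec_solution; infer_instance

-- ===== CLAIM (what is proved, stated in full; the proofs are below) =====
def Claim_equal_solution : Prop := ∀ (a : List Int), Dom_solution a → Spec_solution a (solution a)

-- ===== LEMMAS AND PROOFS =====

/-- A's per-element score: count of `v` plus count of `v + 1`. -/
def pvScore (a : List Int) (v : Int) : Int := (a.count v : Int) + (a.count (v + 1) : Int)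

/-- The value A's fold computes. -/
def pvM (a : List Int) : Int := a.foldl (fun m v => max m (pvScore a v)) 0

/-- Characterisation of a `foldl max` accumulator. -/
lemma foldmax_spec (l : List Int) (h : Int → Int) (i : Int) :
    i ≤ l.foldl (fun m x => max m (h x)) i ∧
    (∀ x ∈ l, h x ≤ l.foldl (fun m x => max m (h x)) i) ∧
    (l.foldl (fun m x => max m (h x)) i = i ∨
      ∃ x ∈ l, l.foldl (fun m x => max m (h x)) i = h x) := by
  induction l generalizing i with
  | nil => simp
  | cons y t ih =>
    obtain ⟨h1, h2, h3⟩ := ih (max i (h y))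
    refine ⟨le_trans (le_max_left _ _) h1, ?_, ?_⟩
    · intro x hx
      rcases List.mem_cons.mp hx with hx | hx
      · subst hx; exact le_trans (le_max_right _ _) h1
      · exact h2 x hx
    · rcases h3 with h3 | ⟨x, hx, h3⟩
      · rcases max_cases i (h y) with ⟨he, _⟩ | ⟨he, _⟩
        · exact Or.inl (by simpa [he] using h3)
        · exact Or.inr ⟨y, List.mem_cons_self, by simpa [he] using h3⟩
      · exact Or.inr ⟨x, List.mem_cons_of_mem _ hx, h3⟩

/-- Port A computes `pvM`. -/
lemma solution_eq_pvM (a : List Int) : solution a = pvM a := by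
  unfold solution pvM pvScore
  simp only [PySem.Dict.getD_counter]
  by_cases h1 : (PySem.Dict.counter a).size = 1
  · rw [if_pos h1]
    -- one distinct value: every element of `a` equals it
    have hsz : (PySem.Set.ofList a).length = 1 := by
      have : (PySem.Dict.counter a).size = (PySem.Dict.counter a).items.length := rfl
      rw [this, PySem.Dict.items_counter, List.length_map] at h1
      exact h1
    obtain ⟨v, hv⟩ := List.length_eq_one_iff.mp hsz
    have hall : ∀ x ∈ a, x = v := by
      intro x hx
      have : x ∈ PySem.Set.ofList a := (PySem.Set.mem_ofList a x).mpr hx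
      rw [hv] at this
      simpa using this
    have hva : v ∈ a := by
      have : v ∈ PySem.Set.ofList a := by rw [hv]; simp
      exact (PySem.Set.mem_ofList a v).mp this
    obtain ⟨b, t, hbt⟩ : ∃ b t, a = b :: t := by
      cases a with
      | nil => cases hva
      | cons b t => exact ⟨b, t, rfl⟩
    have hb : b = v := hall b (by rw [hbt]; exact List.mem_cons_self)
    have hget : (PySem.List.pyGet? a 0).getD 0 = v := by
      rw [hbt, PySem.List.pyGet?_zero_cons]; simpa using hb
    rw [hget]
    -- LHS is count v = length
    have hcv : a.count v = a.length := List.count_eq_length.mpr (fun b hb => (hall b hb).symm)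
    have hc1 : a.count (v + 1) = 0 := by
      rw [List.count_eq_zero]
      intro hmem
      have := hall _ hmem
      omega
    obtain ⟨hM0, hMub, hMcases⟩ :=
      foldmax_spec a (fun x => (a.count x : Int) + (a.count (x + 1) : Int)) 0
    have hle1 : (a.count v : Int) ≤
        a.foldl (fun m x => max m ((a.count x : Int) + (a.count (x + 1) : Int))) 0 := by
      have := hMub v hva
      omega
    have hle2 : a.foldl (fun m x => max m ((a.count x : Int) + (a.count (x + 1) : Int))) 0
        ≤ (a.count v : Int) := by
      rcases hMcases with h | ⟨x, hx, h⟩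
      · rw [h]; exact_mod_cast Int.ofNat_nonneg _
      · rw [h, hall x hx]
        omega
    omega
  · rw [if_neg h1]

-- definitions used only by the proofs about port B
/-- Minimal left pointer for right end `r` (what the while loop computes from 0). -/
def pvLeast (s : List Int) (r : Nat) : Nat := pvAdvance s r 0

/-- Window length at right end `r`. -/
def pvW (s : List Int) (r : Nat) : Int := (r : Int) - (pvLeast s r : Int) + 1

/-- The fold of port B over `range m`. -/
def pvLoop (s : List Int) (m : Nat) : Nat × Int :=
  (List.range m).foldl
    (fun (st : Nat × Int) r =>
      let l := pvAdvance s r st.1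
      (l, max st.2 ((r : Int) - (l : Int) + 1))) (0, 0)

lemma advance_spec (s : List Int)
    (hs : ∀ i j : Nat, i ≤ j → j < s.length → s.getD i 0 ≤ s.getD j 0)
    (r : Nat) (hr : r < s.length) :
    ∀ l0 : Nat, l0 ≤ r → (∀ i, i < l0 → s.getD r 0 - s.getD i 0 > 1) →
      l0 ≤ pvAdvance s r l0 ∧ pvAdvance s r l0 ≤ r ∧
      s.getD r 0 - s.getD (pvAdvance s r l0) 0 ≤ 1 ∧
      (∀ i, i < pvAdvance s r l0 → s.getD r 0 - s.getD i 0 > 1) := by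
  suffices H : ∀ k l0, r - l0 ≤ k → l0 ≤ r → (∀ i, i < l0 → s.getD r 0 - s.getD i 0 > 1) →
      l0 ≤ pvAdvance s r l0 ∧ pvAdvance s r l0 ≤ r ∧
      s.getD r 0 - s.getD (pvAdvance s r l0) 0 ≤ 1 ∧
      (∀ i, i < pvAdvance s r l0 → s.getD r 0 - s.getD i 0 > 1) by
    intro l0 h1 h2
    exact H (r - l0) l0 le_rfl h1 h2
  intro k
  induction k with
  | zero =>
    intro l0 hk h1 h2
    have hl : l0 = r := by omega
    rw [pvAdvance, dif_neg (by omega)]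
    subst hl
    refine ⟨le_rfl, le_rfl, by omega, h2⟩
  | succ k ih =>
    intro l0 hk h1 h2
    by_cases hc : l0 < r ∧ s.getD r 0 - s.getD l0 0 > 1
    · rw [pvAdvance, dif_pos hc]
      have h2' : ∀ i, i < l0 + 1 → s.getD r 0 - s.getD i 0 > 1 := by
        intro i hi
        rcases Nat.lt_succ_iff_lt_or_eq.mp hi with hi | hi
        · exact h2 i hi
        · subst hi; exact hc.2
      obtain ⟨g1, g2, g3, g4⟩ := ih (l0 + 1) (by omega) (by omega) h2'
      exact ⟨by omega, g2, g3, g4⟩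
    · rw [pvAdvance, dif_neg hc]
      refine ⟨le_rfl, h1, ?_, h2⟩
      rcases Nat.lt_or_ge l0 r with hlt | hge
      · push_neg at hc
        exact hc hlt
      · have : l0 = r := by omega
        subst this
        omega

lemma least_spec (s : List Int)
    (hs : ∀ i j : Nat, i ≤ j → j < s.length → s.getD i 0 ≤ s.getD j 0)
    (r : Nat) (hr : r < s.length) :
    pvLeast s r ≤ r ∧ s.getD r 0 - s.getD (pvLeast s r) 0 ≤ 1 ∧
      (∀ i, i < pvLeast s r → s.getD r 0 - s.getD i 0 > 1) := by
  obtain ⟨_, g2, g3, g4⟩ := advance_spec s hs r hr 0 (Nat.zero_le r) (by omega)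
  exact ⟨g2, g3, g4⟩

lemma advance_step (s : List Int)
    (hs : ∀ i j : Nat, i ≤ j → j < s.length → s.getD i 0 ≤ s.getD j 0)
    (r : Nat) (hr : r + 1 < s.length) :
    pvAdvance s (r + 1) (pvLeast s r) = pvLeast s (r + 1) := by
  obtain ⟨h1a, h1b, h1c⟩ := least_spec s hs r (by omega)
  have hmin' : ∀ i, i < pvLeast s r → s.getD (r + 1) 0 - s.getD i 0 > 1 := by
    intro i hi
    have := h1c i hi
    have := hs r (r + 1) (by omega) hr
    omega
  obtain ⟨g1, g2, g3, g4⟩ := advance_spec s hs (r + 1) hr (pvLeast s r) (by omega) hmin'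
  obtain ⟨k1, k2, k3⟩ := least_spec s hs (r + 1) hr
  rcases lt_trichotomy (pvAdvance s (r + 1) (pvLeast s r)) (pvLeast s (r + 1)) with h | h | h
  · have := k3 _ h
    omega
  · exact h
  · have := g4 _ h
    omega

/-- Loop invariant for B's fold over `range m`. -/
lemma loop_inv (s : List Int)
    (hs : ∀ i j : Nat, i ≤ j → j < s.length → s.getD i 0 ≤ s.getD j 0)
    (m : Nat) (hm : m ≤ s.length) :
    (pvLoop s m).1 = (if m = 0 then 0 else pvLeast s (m - 1)) ∧
    (0 : Int) ≤ (pvLoop s m).2 ∧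
    (∀ r, r < m → pvW s r ≤ (pvLoop s m).2) ∧
    ((pvLoop s m).2 = 0 ∨ ∃ r, r < m ∧ (pvLoop s m).2 = pvW s r) := by
  induction m with
  | zero => simp [pvLoop]
  | succ m ih =>
    obtain ⟨ih1, ih2, ih3, ih4⟩ := ih (by omega)
    have hstep : pvLoop s (m + 1) =
        (pvAdvance s m (pvLoop s m).1,
          max (pvLoop s m).2 ((m : Int) - (pvAdvance s m (pvLoop s m).1 : Int) + 1)) := by
      unfold pvLoop
      rw [List.range_succ, List.foldl_append]
      rfl
    have hl : pvAdvance s m (pvLoop s m).1 = pvLeast s m := by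
      by_cases h0 : m = 0
      · subst h0
        rw [ih1, if_pos rfl]
        rfl
      · rw [ih1, if_neg h0]
        have hm1 : m - 1 + 1 = m := by omega
        have := advance_step s hs (m - 1) (by omega)
        rw [hm1] at this
        exact this
    have hW : (m : Int) - (pvAdvance s m (pvLoop s m).1 : Int) + 1 = pvW s m := by
      rw [hl]; rfl
    refine ⟨?_, ?_, ?_, ?_⟩
    · rw [hstep]
      simp [hl]
    · rw [hstep]
      exact le_trans ih2 (le_max_left _ _)
    · intro r hrm
      rw [hstep]
      simp only
      rcases Nat.lt_succ_iff_lt_or_eq.mp hrm with h | h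
      · exact le_trans (ih3 r h) (le_max_left _ _)
      · subst h
        rw [hW.symm] at *
        exact le_max_right _ _
    · rw [hstep]
      simp only
      rcases max_cases (pvLoop s m).2 ((m : Int) - (pvAdvance s m (pvLoop s m).1 : Int) + 1)
        with ⟨he, _⟩ | ⟨he, _⟩
      · rw [he]
        rcases ih4 with h | ⟨r, hr, h⟩
        · exact Or.inl h
        · exact Or.inr ⟨r, by omega, h⟩
      · rw [he, hW]
        exact Or.inr ⟨m, by omega, rfl⟩

lemma countP_range_ge (m k : Nat) (hk : k ≤ m) :
    (List.range m).countP (fun i => decide (k ≤ i)) = m - k := by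
  induction m with
  | zero => simp
  | succ m ih =>
    by_cases h : k ≤ m
    · rw [List.range_succ, List.countP_append, ih h]
      simp [h]
      omega
    · have hk' : k = m + 1 := by omega
      subst hk'
      have h0 : (List.range (m + 1)).countP (fun i => decide (m + 1 ≤ i)) = 0 := by
        rw [List.countP_eq_zero]
        intro i hi
        have := List.mem_range.mp hi
        simp only [decide_eq_true_eq]
        omega
      rw [h0]
      omega

lemma countP_window (l : List Int) (c : Int) (hl : ∀ x ∈ l, x ≤ c) :
    l.countP (fun x => decide (c - x ≤ 1)) = l.count (c - 1) + l.count c := by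
  induction l with
  | nil => simp
  | cons x t ih =>
    have hx : x ≤ c := hl x List.mem_cons_self
    have ht := ih (fun y hy => hl y (List.mem_cons_of_mem _ hy))
    simp only [List.countP_cons, List.count_cons, ht, beq_iff_eq, decide_eq_true_eq]
    split_ifs <;> omega

lemma take_eq_map_range (s : List Int) (m : Nat) (hm : m ≤ s.length) :
    s.take m = (List.range m).map (fun i => s.getD i 0) := by
  apply List.ext_getElem
  · simp [List.length_take]
    omega
  · intro i h1 h2
    have hi : i < m := by simpa using h2
    have hi' : i < s.length := by omega
    simp only [List.getElem_take, List.getElem_map, List.getElem_range]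
    rw [List.getD_eq_getElem _ _ hi']

lemma count_drop_zero (s : List Int)
    (hs : ∀ i j : Nat, i ≤ j → j < s.length → s.getD i 0 ≤ s.getD j 0)
    (r : Nat) (hr : r < s.length) (v : Int) (hv : v < s.getD r 0) :
    (s.drop (r + 1)).count v = 0 := by
  rw [List.count_eq_zero]
  intro hmem
  obtain ⟨j, hj, hjv⟩ := List.mem_iff_getElem.mp hmem
  have hlen : r + 1 + j < s.length := by
    have := hj
    simp [List.length_drop] at this
    omega
  rw [List.getElem_drop] at hjv
  have hmono := hs r (r + 1 + j) (by omega) hlen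
  rw [List.getD_eq_getElem _ _ hlen] at hmono
  rw [hjv] at hmono
  omega

/-- The window at `r` counts the `s[r]-1`s in all of `s` plus the `s[r]`s in the prefix. -/
lemma W_eq (s : List Int)
    (hs : ∀ i j : Nat, i ≤ j → j < s.length → s.getD i 0 ≤ s.getD j 0)
    (r : Nat) (hr : r < s.length) :
    pvW s r = ((s.count (s.getD r 0 - 1) : Int)) + (((s.take (r + 1)).count (s.getD r 0) : Int)) := by
  obtain ⟨hle, hP, hmin⟩ := least_spec s hs r hr
  have h1 : (s.take (r + 1)).countP (fun x => decide (s.getD r 0 - x ≤ 1)) = (r + 1) - pvLeast s r := by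
    rw [take_eq_map_range s (r + 1) (by omega), List.countP_map]
    have hiff : ∀ i ∈ List.range (r + 1),
        ((fun x => decide (s.getD r 0 - x ≤ 1)) ∘ (fun i => s.getD i 0)) i = true ↔
        (fun i => decide (pvLeast s r ≤ i)) i = true := by
      intro i hi
      have hi' : i < r + 1 := List.mem_range.mp hi
      simp only [Function.comp, decide_eq_true_eq]
      constructor
      · intro h
        by_contra hlt
        push_neg at hlt
        have := hmin i hlt
        omega
      · intro h
        have := hs (pvLeast s r) i h (by omega)
        omega
    rw [List.countP_congr hiff, countP_range_ge (r + 1) (pvLeast s r) (by omega)]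
  have h2 : (s.take (r + 1)).countP (fun x => decide (s.getD r 0 - x ≤ 1)) =
      (s.take (r + 1)).count (s.getD r 0 - 1) + (s.take (r + 1)).count (s.getD r 0) := by
    apply countP_window
    intro x hx
    obtain ⟨i, hi, hix⟩ := List.mem_iff_getElem.mp hx
    have hi2 : i < r + 1 ∧ i < s.length := by
      simp [List.length_take] at hi
      omega
    rw [List.getElem_take] at hix
    have := hs i r (by omega) hr
    rw [List.getD_eq_getElem _ _ hi2.2] at this
    rw [hix] at this
    omega
  have hsplit : ∀ c : Int, s.count c = (s.take (r + 1)).count c + (s.drop (r + 1)).count c := by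
    intro c
    conv_lhs => rw [← List.take_append_drop (r + 1) s]
    rw [List.count_append]
  have h3 : (s.take (r + 1)).count (s.getD r 0 - 1) = s.count (s.getD r 0 - 1) := by
    have h5 := hsplit (s.getD r 0 - 1)
    rw [count_drop_zero s hs r hr _ (by omega)] at h5
    omega
  have h4 : pvW s r = (((r + 1) - pvLeast s r : Nat) : Int) := by
    unfold pvW
    rw [Nat.cast_sub (by omega)]
    push_cast
    ring
  rw [h4, ← h1, h2, h3]
  push_cast
  ring

/-- Last occurrence of a member: the prefix count there is the full count. -/
lemma last_occ (s : List Int)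
    (hs : ∀ i j : Nat, i ≤ j → j < s.length → s.getD i 0 ≤ s.getD j 0)
    (v : Int) (hv : v ∈ s) :
    ∃ r, r < s.length ∧ s.getD r 0 = v ∧ (s.take (r + 1)).count v = s.count v := by
  obtain ⟨i0, hi0, hi0v⟩ := List.mem_iff_getElem.mp hv
  set p : Nat → Prop := fun i => i < s.length ∧ s.getD i 0 = v with hp
  have hi0p : p i0 := ⟨hi0, by rw [List.getD_eq_getElem _ _ hi0]; exact hi0v⟩
  have hle : i0 ≤ s.length - 1 := by omega
  have hr := Nat.findGreatest_spec hle hi0p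
  set R := Nat.findGreatest p (s.length - 1) with hR
  refine ⟨R, hr.1, hr.2, ?_⟩
  have hz : (s.drop (R + 1)).count v = 0 := by
    rw [List.count_eq_zero]
    intro hmem
    obtain ⟨j, hj, hjv⟩ := List.mem_iff_getElem.mp hmem
    have hlen : R + 1 + j < s.length := by
      simp [List.length_drop] at hj
      omega
    rw [List.getElem_drop] at hjv
    have hpj : p (R + 1 + j) := ⟨hlen, by rw [List.getD_eq_getElem _ _ hlen]; exact hjv⟩
    exact absurd hpj (Nat.findGreatest_is_greatest (n := s.length - 1) (by omega) (by omega))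
  have hsplit : s.count v = (s.take (R + 1)).count v + (s.drop (R + 1)).count v := by
    conv_lhs => rw [← List.take_append_drop (R + 1) s]
    rw [List.count_append]
  omega

lemma sorted_mono (a : List Int) :
    ∀ i j : Nat, i ≤ j → j < (PySem.List.sorted a (fun x => x) false).length →
      (PySem.List.sorted a (fun x => x) false).getD i 0 ≤
        (PySem.List.sorted a (fun x => x) false).getD j 0 := by
  intro i j hij hj
  rw [List.getD_eq_getElem _ _ (lt_of_le_of_lt hij hj), List.getD_eq_getElem _ _ hj]
  exact PySem.List.sorted_id_getElem_mono a hij hj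

/-- Port B computes `pvM`. -/
lemma solution_alt_eq_pvM (a : List Int) : solution_alt a = pvM a := by
  have hdef : solution_alt a =
      (pvLoop (PySem.List.sorted a (fun x => x) false)
        (PySem.List.sorted a (fun x => x) false).length).2 := rfl
  rw [hdef]
  have hmono := sorted_mono a
  set s := PySem.List.sorted a (fun x => x) false with hsdef
  have hperm : s.Perm a := PySem.List.sorted_perm a _ false
  have hcount : ∀ v : Int, s.count v = a.count v := fun v => hperm.count_eq v
  obtain ⟨-, hpos, hub, hcases⟩ := loop_inv s hmono s.length le_rfl
  obtain ⟨hM0, hMub, hMcases⟩ := foldmax_spec a (pvScore a) 0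
  have hMdef : pvM a = a.foldl (fun m x => max m (pvScore a x)) 0 := rfl
  rw [← hMdef] at hM0 hMub hMcases
  apply le_antisymm
  · -- best ≤ M
    rcases hcases with h | ⟨r, hrlt, h⟩
    · rw [h]; exact hM0
    · rw [h, W_eq s hmono r hrlt]
      by_cases hm1 : (s.getD r 0 - 1) ∈ s
      · have hA := hMub _ (hperm.mem_iff.mp hm1)
        unfold pvScore at hA
        have he : s.getD r 0 - 1 + 1 = s.getD r 0 := by ring
        rw [he] at hA
        have ht : (s.take (r + 1)).count (s.getD r 0) ≤ s.count (s.getD r 0) :=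
          (List.take_sublist _ _).count_le _
        have hc1 := hcount (s.getD r 0 - 1)
        have hc2 := hcount (s.getD r 0)
        omega
      · have hz : s.count (s.getD r 0 - 1) = 0 := List.count_eq_zero.mpr hm1
        have hmem : s.getD r 0 ∈ s := by
          rw [List.getD_eq_getElem _ _ hrlt]
          exact List.getElem_mem _
        have hA := hMub _ (hperm.mem_iff.mp hmem)
        unfold pvScore at hA
        have ht : (s.take (r + 1)).count (s.getD r 0) ≤ s.count (s.getD r 0) :=
          (List.take_sublist _ _).count_le _
        have hc2 := hcount (s.getD r 0)
        omega
  · -- M ≤ best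
    rcases hMcases with h | ⟨v, hv, h⟩
    · rw [h]; exact hpos
    · rw [h]
      unfold pvScore
      by_cases hv1 : (v + 1) ∈ s
      · obtain ⟨r, hrlt, hgr, hcnt⟩ := last_occ s hmono (v + 1) hv1
        have hW := W_eq s hmono r hrlt
        rw [hgr] at hW
        have he : v + 1 - 1 = v := by ring
        rw [he, hcnt] at hW
        have hb := hub r hrlt
        have hc1 := hcount v
        have hc2 := hcount (v + 1)
        omega
      · have hz : s.count (v + 1) = 0 := List.count_eq_zero.mpr hv1
        have hvs : v ∈ s := hperm.mem_iff.mpr hv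
        obtain ⟨r, hrlt, hgr, hcnt⟩ := last_occ s hmono v hvs
        have hW := W_eq s hmono r hrlt
        rw [hgr, hcnt] at hW
        have hb := hub r hrlt
        have hc1 := hcount v
        have hc2 := hcount (v + 1)
        have hnn : (0 : Int) ≤ (s.count (v - 1) : Int) := by positivity
        omega

-- ===== VERDICT (by name: the statement is the Claim_ definition above) =====
theorem solution_spec : Claim_equal_solution := by
  intro a _
  unfold Spec_solution
  rw [solution_eq_pvM, solution_alt_eq_pvM]
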